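-- pv_equiv track=rewrite | github.com/leonardosrodrigues0/cs50AI_heredity | heredity.py | genes_dict
-- ===== SOURCE A (Python) =====
-- def genes_dict(people, one_gene, two_genes):
--     """
--     Returns a dictionary that maps each person to the
--     number of genes based on one_gene and two_genes set.
--     """
--     genes = dict()
--
--     for person in people:
--         if person in one_gene:
--             genes[person] = 1
--
--         elif person in two_genes:
--             genes[person] = 2
--
--         else:
--             genes[person] = 0
--
--     return genes
-- ===== SOURCE B (Python) =====
-- def genes_dict(people, one_gene, two_genes):
--     """
--     Returns a dictionary that maps each person to the
--     number of genes based on one_gene and two_genes set.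
--     """
--     genes = {person: 0 for person in people}
--     people_set = set(people)
--
--     for person in two_genes:
--         if person in people_set:
--             genes[person] = 2
--
--     for person in one_gene:
--         if person in people_set:
--             genes[person] = 1
--
--     return genes
-- ===== Notes on version B (the rewrite author's own statement) =====
-- stated objective: alternative
-- what changed: B builds the dict of zeros in one comprehension and then overwrites it by iterating over the two marker sets (two_genes first, then one_gene so the if/elif precedence is preserved), instead of A's single per-person if/elif loop with membership tests.
import Mathlib
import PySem

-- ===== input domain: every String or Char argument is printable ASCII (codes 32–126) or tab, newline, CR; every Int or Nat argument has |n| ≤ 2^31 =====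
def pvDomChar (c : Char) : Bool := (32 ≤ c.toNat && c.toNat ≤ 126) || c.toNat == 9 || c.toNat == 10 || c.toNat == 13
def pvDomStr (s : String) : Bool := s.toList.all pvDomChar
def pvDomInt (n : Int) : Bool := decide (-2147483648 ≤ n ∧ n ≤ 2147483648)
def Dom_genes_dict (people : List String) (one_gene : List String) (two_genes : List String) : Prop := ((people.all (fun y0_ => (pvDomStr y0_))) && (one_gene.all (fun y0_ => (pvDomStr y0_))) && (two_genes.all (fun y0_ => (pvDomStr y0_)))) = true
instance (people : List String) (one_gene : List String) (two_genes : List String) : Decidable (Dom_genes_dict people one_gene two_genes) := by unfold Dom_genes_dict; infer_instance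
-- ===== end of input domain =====

-- B builds the zero dict first, then overwrites by iterating the two marker sets (two_genes, then one_gene): a different multi-pass decomposition of the same cost.


-- ===== PORT A =====
def genes_dict (people : List String) (one_gene : List String) (two_genes : List String) : List (String × Int) :=
  (people.foldl (fun genes person =>
      if one_gene.contains person then genes.insert person 1
      else if two_genes.contains person then genes.insert person 2
      else genes.insert person 0)
    (PySem.Dict.empty : PySem.Dict String Int)).items

-- ===== PORT B =====
def genes_dict_alt (people : List String) (one_gene : List String) (two_genes : List String) : List (String × Int) :=
  let genes0 : PySem.Dict String Int :=
    people.foldl (fun genes person => genes.insert person 0) PySem.Dict.empty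
  let people_set : PySem.Set String := PySem.Set.ofList people
  let genes1 :=
    two_genes.foldl (fun genes person =>
      if PySem.Set.contains people_set person then genes.insert person 2 else genes) genes0
  let genes2 :=
    one_gene.foldl (fun genes person =>
      if PySem.Set.contains people_set person then genes.insert person 1 else genes) genes1
  genes2.items

-- ===== PRECONDITION & SPEC =====
def Spec_genes_dict (people : List String) (one_gene : List String) (two_genes : List String) (out : List (String × Int)) : Prop := out = genes_dict_alt people one_gene two_genes
instance (people : List String) (one_gene : List String) (two_genes : List String) (out : List (String × Int)) : Decidable (Spec_genes_dict people one_gene two_genes out) := by unfold Spec_genes_dict; infer_instance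

-- ===== CLAIM (what is proved, stated in full; the proofs are below) =====
def Claim_equal_genes_dict : Prop := ∀ (people : List String) (one_gene : List String) (two_genes : List String), Dom_genes_dict people one_gene two_genes → Spec_genes_dict people one_gene two_genes (genes_dict people one_gene two_genes)

-- ===== LEMMAS AND PROOFS =====

-- value finally stored by A for a key of the dict
def pvVal (one_gene two_genes : List String) (k : String) : Int :=
  if one_gene.contains k then 1 else if two_genes.contains k then 2 else 0

-- an insert-with-value-function loop: final value of k is v k if k was seen, else unchanged
lemma getD_foldl_insert_fun (v : String → Int) (l : List String)
    (d : PySem.Dict String Int) (k : String) :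
    (l.foldl (fun g p => g.insert p (v p)) d).getD k 0
      = if k ∈ l then v k else d.getD k 0 := by
  induction l generalizing d with
  | nil => simp
  | cons x xs ih =>
      simp only [List.foldl_cons, ih, PySem.Dict.getD_insert, List.mem_cons]
      by_cases hx : k = x <;> by_cases hm : k ∈ xs <;> simp [hx, hm]

-- a guarded constant-value pass: final value of k is w if k ∈ l and the guard holds, else unchanged
lemma getD_foldl_guarded (c : String → Bool) (w : Int) (l : List String)
    (d : PySem.Dict String Int) (k : String) :
    (l.foldl (fun g p => if c p then g.insert p w else g) d).getD k 0
      = if k ∈ l ∧ c k then w else d.getD k 0 := by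
  induction l generalizing d with
  | nil => simp
  | cons x xs ih =>
      simp only [List.foldl_cons, List.mem_cons]
      by_cases hc : c x
      · simp only [hc, if_true, ih, PySem.Dict.getD_insert]
        by_cases hx : k = x <;> by_cases hm : k ∈ xs <;> simp_all
      · simp only [hc, ih]
        by_cases hx : k = x <;> by_cases hm : k ∈ xs <;> simp_all

-- a guarded pass whose guard implies the key is already present never changes the key list
lemma keys_foldl_guarded (c : String → Bool) (w : Int) (l : List String)
    (d : PySem.Dict String Int)
    (h : ∀ p, c p = true → d.contains p = true) :
    (l.foldl (fun g p => if c p then g.insert p w else g) d).keys = d.keys := by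
  induction l generalizing d with
  | nil => rfl
  | cons x xs ih =>
      simp only [List.foldl_cons]
      by_cases hc : c x
      · rw [if_pos hc, ih]
        · exact PySem.Dict.keys_insert_of_contains _ _ (h x hc)
        · intro p hp
          rw [PySem.Dict.contains_insert]
          simp [h p hp]
      · rw [if_neg hc]; exact ih d h

lemma keys_A (people one_gene two_genes : List String) :
    (people.foldl (fun genes person =>
        if one_gene.contains person then genes.insert person 1
        else if two_genes.contains person then genes.insert person 2
        else genes.insert person 0)
      (PySem.Dict.empty : PySem.Dict String Int)).keys
      = PySem.Set.ofList people := by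
  have hstep : (fun (genes : PySem.Dict String Int) person =>
      if one_gene.contains person then genes.insert person 1
      else if two_genes.contains person then genes.insert person 2
      else genes.insert person 0)
      = fun genes person => genes.insert person (pvVal one_gene two_genes person) := by
    funext g p; unfold pvVal; split_ifs <;> rfl
  rw [hstep, PySem.Dict.keys_foldl_insert]
  simp [PySem.Set.update_nil_left]

-- ===== VERDICT (by name: the statement is the Claim_ definition above) =====
theorem genes_dict_spec : Claim_equal_genes_dict := by
  unfold Claim_equal_genes_dict Spec_genes_dict genes_dict genes_dict_alt
  intro people one_gene two_genes _
  have hstep : (fun (genes : PySem.Dict String Int) person =>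
      if one_gene.contains person then genes.insert person 1
      else if two_genes.contains person then genes.insert person 2
      else genes.insert person 0)
      = fun genes person => genes.insert person (pvVal one_gene two_genes person) := by
    funext g p; unfold pvVal; split_ifs <;> rfl
  set dA := people.foldl (fun genes person =>
      if one_gene.contains person then genes.insert person 1
      else if two_genes.contains person then genes.insert person 2
      else genes.insert person 0) (PySem.Dict.empty : PySem.Dict String Int) with hdA
  set g0 : PySem.Dict String Int :=
      people.foldl (fun genes person => genes.insert person 0) PySem.Dict.empty with hg0
  set g1 := two_genes.foldl (fun genes person =>
      if PySem.Set.contains (PySem.Set.ofList people) person then genes.insert person 2 else genes) g0 with hg1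
  set g2 := one_gene.foldl (fun genes person =>
      if PySem.Set.contains (PySem.Set.ofList people) person then genes.insert person 1 else genes) g1 with hg2
  -- keys
  have hkA : dA.keys = PySem.Set.ofList people := keys_A people one_gene two_genes
  have hk0 : g0.keys = PySem.Set.ofList people := by
    rw [hg0, PySem.Dict.keys_foldl_insert (f := fun _ _ => (0 : Int))]
    simp [PySem.Set.update_nil_left]
  have hmem0 : ∀ p, PySem.Set.contains (PySem.Set.ofList people) p = true → g0.contains p = true := by
    intro p hp
    rw [PySem.Dict.contains_iff_mem_keys, hk0]
    exact (PySem.Set.contains_iff _ _).mp hp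
  have hk1 : g1.keys = g0.keys := by
    rw [hg1]; exact keys_foldl_guarded _ _ _ _ hmem0
  have hmem1 : ∀ p, PySem.Set.contains (PySem.Set.ofList people) p = true → g1.contains p = true := by
    intro p hp
    rw [PySem.Dict.contains_iff_mem_keys, hk1, ← PySem.Dict.contains_iff_mem_keys]
    exact hmem0 p hp
  have hk2 : g2.keys = g1.keys := by
    rw [hg2]; exact keys_foldl_guarded _ _ _ _ hmem1
  -- nodup
  have hndA : dA.keys.Nodup := by rw [hkA]; exact PySem.Set.nodup_ofList people
  have hnd2 : g2.keys.Nodup := by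
    rw [hk2, hk1, hk0]; exact PySem.Set.nodup_ofList people
  -- items via keys and getD
  rw [PySem.Dict.items_eq_map_keys dA hndA 0, PySem.Dict.items_eq_map_keys g2 hnd2 0,
      hkA, hk2, hk1, hk0]
  apply List.map_congr_left
  intro k hk
  have hkp : k ∈ people := (PySem.Set.mem_ofList _ _).mp hk
  have hkc : PySem.Set.contains (PySem.Set.ofList people) k = true := by
    rw [PySem.Set.contains_iff, PySem.Set.mem_ofList]; exact hkp
  have hA : dA.getD k 0 = pvVal one_gene two_genes k := by
    rw [hdA, hstep, getD_foldl_insert_fun, if_pos hkp]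
  have h0 : g0.getD k 0 = 0 := by
    rw [hg0, getD_foldl_insert_fun (v := fun _ => (0:Int))]
    simp
  have h1 : g1.getD k 0 = if k ∈ two_genes then 2 else 0 := by
    rw [hg1, getD_foldl_guarded, h0, hkc]
    by_cases h : k ∈ two_genes <;> simp [h]
  have h2 : g2.getD k 0 = pvVal one_gene two_genes k := by
    rw [hg2, getD_foldl_guarded, h1, hkc]
    unfold pvVal
    by_cases h : k ∈ one_gene <;> by_cases h' : k ∈ two_genes <;> simp [h, h']
  rw [hA, h2]
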